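-- pv_equiv track=rewrite | github.com/metamodernity/code_wars | Python/7kyu/charCodeCalculation.py | calc
-- ===== SOURCE A (Python) =====
-- def calc(x):
--     total1 = ''
--     for i in x:
--         total1 += (str(ord(i)))
--     total2 = total1.replace('7', '1')
--     total1 = sum(map(int,str(total1)))
--     total2 = sum(map(int,str(total2)))
--     n = total1 - total2
--     return n
-- ===== SOURCE B (Python) =====
-- def calc(x):
--     sevens = 0
--     for i in x:
--         sevens += str(ord(i)).count('7')
--     return 6 * sevens
-- ===== Notes on version B (the rewrite author's own statement) =====
-- stated objective: simpler
-- what changed: Replaced the build-concatenated-string / replace-7-with-1 / two digit-sums / subtract pipeline by a single pass that counts '7' digits in each char code and returns 6 times that count (each replaced digit lowers the sum by exactly 6).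
import Mathlib
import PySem

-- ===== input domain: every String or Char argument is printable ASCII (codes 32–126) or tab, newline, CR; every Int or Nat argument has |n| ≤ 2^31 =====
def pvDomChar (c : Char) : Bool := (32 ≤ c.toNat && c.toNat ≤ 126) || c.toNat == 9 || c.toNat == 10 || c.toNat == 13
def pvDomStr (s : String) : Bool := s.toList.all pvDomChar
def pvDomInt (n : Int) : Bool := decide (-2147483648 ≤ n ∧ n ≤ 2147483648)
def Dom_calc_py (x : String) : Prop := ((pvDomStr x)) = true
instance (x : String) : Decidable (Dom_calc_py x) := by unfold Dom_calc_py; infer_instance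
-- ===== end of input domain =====

-- B replaces A's concatenate / replace('7','1') / two digit-sums / subtract pipeline by
-- counting the '7' digits of each char code in one pass and returning 6 times the count (simpler).

-- ===== PORT A =====
-- int(c) for the single digit char c; `.getD 0` is never taken: every character of
-- str(ord(i)) is a decimal digit, so Python's int() never raises here (exact on this use).
def pvDigVal (c : Char) : Int := (PySem.Int.ofChars? [c]).getD 0

def calc_py (x : String) : Int :=
  let total1 : List Char := x.toList.foldl (fun acc i => acc ++ PySem.Int.toChars ((i.toNat : Int))) []
  let total2 : List Char := PySem.Chars.replace total1 ['7'] ['1']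
  let t1 : Int := (total1.map pvDigVal).sum
  let t2 : Int := (total2.map pvDigVal).sum
  t1 - t2

-- ===== PORT B =====
def calc_py_alt (x : String) : Int :=
  6 * x.toList.foldl (fun acc i => acc + (PySem.Chars.count (PySem.Int.toChars ((i.toNat : Int))) ['7'] : Int)) 0

-- ===== PRECONDITION & SPEC =====
def Spec_calc_py (x : String) (out : Int) : Prop := out = calc_py_alt x
instance (x : String) (out : Int) : Decidable (Spec_calc_py x out) := by unfold Spec_calc_py; infer_instance

-- ===== CLAIM (what is proved, stated in full; the proofs are below) =====
def Claim_equal_calc_py : Prop := ∀ (x : String), Dom_calc_py x → Spec_calc_py x (calc_py x)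

-- ===== LEMMAS AND PROOFS =====

-- single-char replace is a map
theorem pv_replace_go_single (o n : Char) :
    ∀ (l : List Char) (fuel : Nat) (acc : List Char), l.length ≤ fuel →
      PySem.Chars.replace.go [o] [n] fuel l acc
        = acc.reverse ++ l.map (fun c => if c = o then n else c) := by
  intro l
  induction l with
  | nil =>
      intro fuel acc _
      cases fuel <;> simp [PySem.Chars.replace.go]
  | cons c t ih =>
      intro fuel acc h
      cases fuel with
      | zero => simp at h
      | succ f =>
          simp only [PySem.Chars.replace.go, List.isPrefixOf]
          by_cases hc : c = o
          · subst hc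
            have := ih f (n :: acc) (by simpa using h)
            simp [this]
          · have hb : (o == c) = false := beq_eq_false_iff_ne.mpr (Ne.symm hc)
            have := ih f (c :: acc) (by simpa using h)
            simp [hb, hc, this]

theorem pv_replace_single (o n : Char) (l : List Char) :
    PySem.Chars.replace l [o] [n] = l.map (fun c => if c = o then n else c) := by
  simp [PySem.Chars.replace, pv_replace_go_single o n l l.length [] (le_refl _)]

-- single-char count is List.count
theorem pv_count_go_single (o : Char) :
    ∀ (l : List Char) (fuel acc : Nat), l.length ≤ fuel →
      PySem.Chars.count.go [o] fuel l acc = acc + l.count o := by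
  intro l
  induction l with
  | nil =>
      intro fuel acc _
      cases fuel <;> simp [PySem.Chars.count.go]
  | cons c t ih =>
      intro fuel acc h
      cases fuel with
      | zero => simp at h
      | succ f =>
          simp only [PySem.Chars.count.go, List.isPrefixOf]
          by_cases hc : c = o
          · subst hc
            have := ih f (acc + 1) (by simpa using h)
            simp [this]
            omega
          · have hb : (o == c) = false := beq_eq_false_iff_ne.mpr (Ne.symm hc)
            have := ih f acc (by simpa using h)
            simp [hb, hc, this]

theorem pv_count_single (o : Char) (l : List Char) :
    PySem.Chars.count l [o] = l.count o := by
  simp [PySem.Chars.count, pv_count_go_single o l l.length 0 (le_refl _)]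

-- digit-sum minus digit-sum-after-7→1 is 6 · (number of '7's), for ANY char list
theorem pv_sum_sub_replace (l : List Char) :
    (l.map pvDigVal).sum - ((l.map (fun c => if c = '7' then '1' else c)).map pvDigVal).sum
      = 6 * (l.count '7' : Int) := by
  induction l with
  | nil => simp
  | cons c t ih =>
      by_cases hc : c = '7'
      · subst hc
        have h7 : pvDigVal '7' - pvDigVal '1' = 6 := by decide
        simp only [List.map_cons, List.sum_cons, List.count_cons_self]
        push_cast at ih ⊢
        omega
      · have hb : (c == '7') = false := beq_eq_false_iff_ne.mpr hc
        simp only [List.map_cons, List.sum_cons, if_neg hc, List.count_cons, hb]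
        simp only [Bool.false_eq_true, if_false, add_zero]
        omega

-- the string A accumulates is the flat map of the per-char code strings
theorem pv_foldl_append (g : Char → List Char) :
    ∀ (l : List Char) (acc : List Char),
      l.foldl (fun a i => a ++ g i) acc = acc ++ l.flatMap g := by
  intro l
  induction l with
  | nil => simp
  | cons c t ih => intro acc; simp [List.foldl_cons, ih, List.flatMap_cons]

-- B's accumulator is the total count of '7's
theorem pv_foldl_count (g : Char → List Char) :
    ∀ (l : List Char) (a : Int),
      l.foldl (fun acc i => acc + ((g i).count '7' : Int)) a
        = a + ((l.flatMap g).count '7' : Int) := by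
  intro l
  induction l with
  | nil => simp
  | cons c t ih =>
      intro a
      simp only [List.foldl_cons, ih, List.flatMap_cons, List.count_append]
      push_cast
      ring

-- ===== VERDICT (by name: the statement is the Claim_ definition above) =====
theorem calc_py_spec : Claim_equal_calc_py := by
  intro x _
  unfold Spec_calc_py calc_py calc_py_alt
  simp only [pv_foldl_append, List.nil_append, pv_replace_single, pv_count_single,
    pv_foldl_count, zero_add]
  rw [pv_sum_sub_replace]
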